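-- pv_equiv track=rewrite | github.com/tcc0lin/Review_Reverse | 2019_Reverse_Review/nubia/m_nubia.py | unsbox
-- ===== SOURCE A (Python) =====
-- def unsbox(arg: str) -> str:
--     _0x4b082b = [0xf, 0x23, 0x1d, 0x18, 0x21, 0x10, 0x1, 0x26, 0xa, 0x9, 0x13, 0x1f, 0x28, 0x1b, 0x16, 0x17, 0x19, 0xd,
--                  0x6, 0xb, 0x27, 0x12, 0x14, 0x8, 0xe, 0x15, 0x20, 0x1a, 0x2, 0x1e, 0x7, 0x4, 0x11, 0x5, 0x3, 0x1c,
--                  0x22, 0x25, 0xc, 0x24]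
--     _0x4da0dc = [''] * 40
--     _0x12605e = ''
--     for _0x20a7bf in range(0, len(arg)):
--         _0x385ee3 = arg[_0x20a7bf]
--         for _0x217721 in range(0, len(_0x4b082b)):
--             if _0x4b082b[_0x217721] == _0x20a7bf + 0x1:
--                 _0x4da0dc[_0x217721] = _0x385ee3
--     _0x12605e = ''.join(_0x4da0dc)
--     return _0x12605e
-- ===== SOURCE B (Python) =====
-- def unsbox(arg: str) -> str:
--     _0x4b082b = [0xf, 0x23, 0x1d, 0x18, 0x21, 0x10, 0x1, 0x26, 0xa, 0x9, 0x13, 0x1f, 0x28, 0x1b, 0x16, 0x17, 0x19, 0xd,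
--                  0x6, 0xb, 0x27, 0x12, 0x14, 0x8, 0xe, 0x15, 0x20, 0x1a, 0x2, 0x1e, 0x7, 0x4, 0x11, 0x5, 0x3, 0x1c,
--                  0x22, 0x25, 0xc, 0x24]
--     return ''.join(arg[v - 1] if v - 1 < len(arg) else '' for v in _0x4b082b)
-- ===== Notes on version B (the rewrite author's own statement) =====
-- stated objective: faster
-- what changed: Replaces the nested loop (for each of the n input indices, a linear scan of the 40-entry permutation plus mutation of a result buffer) with a single comprehension over the 40 permutation entries that picks arg[v-1] directly for each output slot.
import Mathlib
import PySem

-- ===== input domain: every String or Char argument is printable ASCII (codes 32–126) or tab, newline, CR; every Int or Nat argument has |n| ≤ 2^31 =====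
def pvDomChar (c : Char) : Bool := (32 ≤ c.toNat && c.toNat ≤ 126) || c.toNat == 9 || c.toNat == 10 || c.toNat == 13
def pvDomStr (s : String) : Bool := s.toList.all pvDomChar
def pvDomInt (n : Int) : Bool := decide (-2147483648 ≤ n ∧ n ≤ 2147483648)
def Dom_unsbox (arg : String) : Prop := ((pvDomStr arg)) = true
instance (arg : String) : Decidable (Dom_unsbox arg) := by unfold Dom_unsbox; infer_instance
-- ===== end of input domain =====

-- B replaces A's nested scan-and-mutate loop (a permutation scan per input character) by one direct pass over the 40 fixed permutation entries (objective: faster; measured so in a timing run).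

-- the fixed permutation literal both Pythons contain (decimal for A's hex constants)
def pvPerm : List Nat :=
  [15, 35, 29, 24, 33, 16, 1, 38, 10, 9, 19, 31, 40, 27, 22, 23, 25, 13,
   6, 11, 39, 18, 20, 8, 14, 21, 32, 26, 2, 30, 7, 4, 17, 5, 3, 28,
   34, 37, 12, 36]

-- ===== PORT A =====
-- outer loop over range(len(arg)); inner loop scans the permutation and writes arg[i] into slot j when perm[j] == i+1
def unsbox (arg : String) : String :=
  let chars := arg.toList
  let res := (List.range chars.length).foldl
    (fun acc i =>
      let c := chars[i]!
      (List.range pvPerm.length).foldl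
        (fun a j => if pvPerm[j]! = i + 1 then a.set j [c] else a) acc)
    (List.replicate 40 ([] : List Char))
  String.ofList res.flatten

-- ===== PORT B =====
-- single pass: for each permutation value v, emit arg[v-1] if that index exists, else ''
def unsbox_alt (arg : String) : String :=
  let chars := arg.toList
  String.ofList ((pvPerm.map (fun v => if v - 1 < chars.length then [chars[v - 1]!] else [])).flatten)

-- ===== PRECONDITION & SPEC =====
def Spec_unsbox (arg : String) (out : String) : Prop := out = unsbox_alt arg
instance (arg : String) (out : String) : Decidable (Spec_unsbox arg out) := by unfold Spec_unsbox; infer_instance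

-- ===== CLAIM (what is proved, stated in full; the proofs are below) =====
def Claim_equal_unsbox : Prop := ∀ (arg : String), Dom_unsbox arg → Spec_unsbox arg (unsbox arg)

-- ===== LEMMAS AND PROOFS =====

-- the inner scan preserves the buffer length
theorem pvLenInner (js : List Nat) (acc : List (List Char)) (c : Char) (i : Nat) :
    (js.foldl (fun a j => if pvPerm[j]! = i + 1 then a.set j [c] else a) acc).length
      = acc.length := by
  induction js generalizing acc with
  | nil => rfl
  | cons j rest ih =>
    simp only [List.foldl_cons]
    rw [ih]
    split <;> simp

-- the outer loop preserves the buffer length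
theorem pvLenOuter (n : Nat) (chars : List Char) :
    ((List.range n).foldl
      (fun acc i =>
        (List.range pvPerm.length).foldl
          (fun a j => if pvPerm[j]! = i + 1 then a.set j [chars[i]!] else a) acc)
      (List.replicate 40 ([] : List Char))).length = 40 := by
  induction n with
  | zero => rfl
  | succ n ih =>
    rw [List.range_succ, List.foldl_append]
    simp only [List.foldl_cons, List.foldl_nil]
    rw [pvLenInner]
    exact ih

-- getElem! versions of the set lemmas
theorem pvSetBang_self {α : Type} [Inhabited α] (l : List α) (j : Nat) (a : α)
    (h : j < l.length) : (l.set j a)[j]! = a := by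
  simp [h]

theorem pvSetBang_ne {α : Type} [Inhabited α] (l : List α) (i j : Nat) (a : α)
    (hne : i ≠ j) : (l.set i a)[j]! = l[j]! := by
  simp [hne]

-- what one inner scan leaves at slot j
theorem pvGetInner (js : List Nat) (acc : List (List Char)) (c : Char) (i j : Nat)
    (hj : j < acc.length) :
    (js.foldl (fun a j' => if pvPerm[j']! = i + 1 then a.set j' [c] else a) acc)[j]!
      = if j ∈ js ∧ pvPerm[j]! = i + 1 then [c] else acc[j]! := by
  induction js generalizing acc with
  | nil => simp
  | cons j' rest ih =>
    simp only [List.foldl_cons]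
    have hj' : j < (if pvPerm[j']! = i + 1 then acc.set j' [c] else acc).length := by
      split <;> simpa using hj
    rw [ih _ hj']
    have hset : (if pvPerm[j']! = i + 1 then acc.set j' [c] else acc)[j]!
        = if j' = j ∧ pvPerm[j']! = i + 1 then [c] else acc[j]! := by
      by_cases hq : pvPerm[j']! = i + 1
      · by_cases he : j' = j
        · subst he; rw [if_pos hq, if_pos ⟨rfl, hq⟩]; exact pvSetBang_self _ _ _ hj
        · rw [if_pos hq, if_neg (fun h => he h.1)]; exact pvSetBang_ne _ _ _ _ he
      · rw [if_neg hq, if_neg (fun h => hq h.2)]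
    rw [hset]
    by_cases hmem : j ∈ j' :: rest ∧ pvPerm[j]! = i + 1
    · rw [if_pos hmem]
      rcases List.mem_cons.mp hmem.1 with he | hr
      · by_cases h1 : j ∈ rest ∧ pvPerm[j]! = i + 1
        · rw [if_pos h1]
        · rw [if_neg h1, if_pos ⟨he.symm, he ▸ hmem.2⟩]
      · rw [if_pos ⟨hr, hmem.2⟩]
    · have h1 : ¬(j ∈ rest ∧ pvPerm[j]! = i + 1) :=
        fun h => hmem ⟨List.mem_cons_of_mem _ h.1, h.2⟩
      have h2 : ¬(j' = j ∧ pvPerm[j']! = i + 1) := by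
        rintro ⟨rfl, hP⟩
        exact hmem ⟨List.mem_cons_self, hP⟩
      rw [if_neg hmem, if_neg h1, if_neg h2]

-- what A's outer loop leaves at slot j after processing the first n input characters
theorem pvGetOuter (n : Nat) (chars : List Char) (j : Nat) (hj : j < 40) :
    ((List.range n).foldl
      (fun acc i =>
        (List.range pvPerm.length).foldl
          (fun a j' => if pvPerm[j']! = i + 1 then a.set j' [chars[i]!] else a) acc)
      (List.replicate 40 ([] : List Char)))[j]!
      = if 1 ≤ pvPerm[j]! ∧ pvPerm[j]! ≤ n then [chars[pvPerm[j]! - 1]!] else [] := by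
  induction n with
  | zero =>
    simp only [List.range_zero, List.foldl_nil]
    rw [if_neg (by omega), List.getElem!_eq_getElem?_getD, List.getElem?_replicate]
    simp [hj]
  | succ n ih =>
    rw [List.range_succ, List.foldl_append]
    simp only [List.foldl_cons, List.foldl_nil]
    have hacc : j < ((List.range n).foldl
        (fun acc i =>
          (List.range pvPerm.length).foldl
            (fun a j' => if pvPerm[j']! = i + 1 then a.set j' [chars[i]!] else a) acc)
        (List.replicate 40 ([] : List Char))).length := by
      rw [pvLenOuter]; exact hj
    rw [pvGetInner _ _ _ _ _ hacc, ih]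
    have hjr : j ∈ List.range pvPerm.length := by
      have : pvPerm.length = 40 := by decide
      simp [List.mem_range, this]; omega
    by_cases hp : pvPerm[j]! = n + 1
    · simp [hjr, hp]
    · have h1 : ¬ (j ∈ List.range pvPerm.length ∧ pvPerm[j]! = n + 1) := fun h => hp h.2
      simp only [h1, if_false]
      split_ifs with h2 h3 h3 <;> first | rfl | omega

-- every permutation entry is at least 1
theorem pvPerm_pos : ∀ v ∈ pvPerm, 1 ≤ v := by decide

-- the two 40-entry piece lists are equal
theorem pvPieces_eq (chars : List Char) :
    ((List.range chars.length).foldl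
      (fun acc i =>
        (List.range pvPerm.length).foldl
          (fun a j' => if pvPerm[j']! = i + 1 then a.set j' [chars[i]!] else a) acc)
      (List.replicate 40 ([] : List Char)))
      = pvPerm.map (fun v => if v - 1 < chars.length then [chars[v - 1]!] else []) := by
  apply List.ext_getElem
  · rw [pvLenOuter]; simp [pvPerm]
  · intro j hjl hjr
    have hj : j < 40 := by rw [pvLenOuter] at hjl; exact hjl
    have hjp : j < pvPerm.length := by simpa [pvPerm] using hj
    have hA := pvGetOuter chars.length chars j hj
    rw [List.getElem!_eq_getElem?_getD, List.getElem?_eq_getElem hjl] at hA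
    simp only [Option.getD_some] at hA
    rw [hA, List.getElem_map]
    have hpos : 1 ≤ pvPerm[j] := pvPerm_pos _ (List.getElem_mem hjp)
    have hbang : pvPerm[j]! = pvPerm[j] := by
      simp [List.getElem!_eq_getElem?_getD, List.getElem?_eq_getElem hjp]
    rw [hbang]
    split_ifs with h1 h2 h2 <;> first | rfl | omega

-- ===== VERDICT (by name: the statement is the Claim_ definition above) =====
theorem unsbox_spec : Claim_equal_unsbox := by
  intro arg _
  unfold Spec_unsbox unsbox unsbox_alt
  simp only []
  rw [pvPieces_eq]
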